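-- pv_equiv track=rewrite | github.com/brianrainer/leetcode-grind | codeforces-0937-div4/d_wa.py | solve
-- ===== SOURCE A (Python) =====
-- def solve(n):
--
--     def is_bin(x):
--         res = x
--         while res:
--             if res%10 > 1:
--                 return False
--             res //= 10
--         return True
--
--     if is_bin(n):
--         return "YES"
--
--     while n % 10 == 0:
--         n //= 10
--
--     def factorize(x):
--         res = x
--         i = 2
--         fdict = {}
--         while i*i <= x:
--             if res % i == 0:
--                 fdict[i] = 0
--                 while res % i == 0:
--                     fdict[i] += 1
--                     res //= i
--             i += 1
--         if res > 1:
--             fdict[res] = 1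
--         return fdict
--
--     fdict = factorize(n)
--     for k in fdict.keys():
--         if not is_bin(k):
--             return "NO"
--
--     return "YES"
-- ===== SOURCE B (Python) =====
-- def solve(n):
--
--     def is_bin(x):
--         while x:
--             if x % 10 > 1:
--                 return False
--             x //= 10
--         return True
--
--     if is_bin(n):
--         return "YES"
--
--     while n % 10 == 0:
--         n //= 10
--
--     if n < 2:
--         return "YES"  # no prime factors at all
--
--     # All primes below 46341 (= ceil(sqrt(2**31))) whose decimal digits are
--     # only 0 and 1 are exactly these three, so they are the only small primes
--     # allowed to divide n.
--     for p in (11, 101, 10111):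
--         while n % p == 0:
--             n //= p
--
--     if n == 1:
--         return "YES"
--
--     # Any remaining allowed factor must be a single binary-digit prime
--     # >= 46341 (two such factors would exceed 2**31).
--     def is_prime(m):
--         i = 2
--         while i * i <= m:
--             if m % i == 0:
--                 return False
--             i += 1
--         return True
--
--     return "YES" if is_bin(n) and is_prime(n) else "NO"
-- ===== Notes on version B (the rewrite author's own statement) =====
-- stated objective: alternative
-- what changed: B replaces A's full trial-division factorization plus key scan by number theory: since the only primes below 46341 = ceil(sqrt(2^31)) with decimal digits 0/1 are 11, 101 and 10111, B divides out just those three constants and then checks the residual (must be 1, or a binary-digit prime, tested with a plain primality test).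
import Mathlib
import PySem

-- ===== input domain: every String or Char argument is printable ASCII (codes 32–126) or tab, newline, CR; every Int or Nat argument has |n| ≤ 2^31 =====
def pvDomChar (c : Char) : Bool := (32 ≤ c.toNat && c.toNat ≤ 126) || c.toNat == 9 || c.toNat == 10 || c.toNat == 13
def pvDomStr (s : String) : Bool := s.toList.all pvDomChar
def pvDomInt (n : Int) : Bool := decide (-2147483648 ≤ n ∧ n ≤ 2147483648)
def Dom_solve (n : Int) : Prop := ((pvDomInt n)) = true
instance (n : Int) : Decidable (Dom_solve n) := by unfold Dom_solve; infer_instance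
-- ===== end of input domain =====

-- B replaces A's full trial-division factorization + key scan by number theory: the only
-- primes below 46341 = ⌈√2³¹⌉ with decimal digits 0/1 are 11, 101 and 10111, so B divides
-- those three constants out and then just tests the residual (binary-digit? prime?).

-- ===== PORT A =====

-- is_bin: while res: if res%10 > 1: return False; res //= 10; return True
def pyIsBin (x : Int) : Bool :=
  if _hx : x = 0 then true
  else if 1 < PySem.Int.mod x 10 then false
  else pyIsBin (PySem.Int.floordiv x 10)
termination_by x.natAbs
decreasing_by
  have h1 := PySem.Int.floordiv_mul_add_mod x 10
  have h2 := PySem.Int.mod_nonneg x (b := 10) (by norm_num)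
  omega

-- while n % 10 == 0: n //= 10   (guard x ≠ 0 only for totality: Python never reaches 0 here)
def pyStrip (x : Int) : Int :=
  if h : PySem.Int.mod x 10 = 0 ∧ x ≠ 0 then pyStrip (PySem.Int.floordiv x 10) else x
termination_by x.natAbs
decreasing_by
  have h1 := PySem.Int.floordiv_mul_add_mod x 10
  omega

-- inner loop of factorize: while res % i == 0: fdict[i] += 1; res //= i
-- (guards 0 < res and 2 ≤ i only for totality; they hold at every reachable call)
def divOutA (i res : Int) (fd : PySem.Dict Int Int) : Int × PySem.Dict Int Int :=
  if h : PySem.Int.mod res i = 0 ∧ 0 < res ∧ 2 ≤ i then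
    divOutA i (PySem.Int.floordiv res i) (fd.modify i 0 (· + 1))
  else (res, fd)
termination_by res.natAbs
decreasing_by
  have h1 := PySem.Int.floordiv_mul_add_mod res i
  rcases h with ⟨hm, hr, hi⟩
  rw [hm] at h1
  have hq : 0 < PySem.Int.floordiv res i := by nlinarith
  have : PySem.Int.floordiv res i * 2 ≤ PySem.Int.floordiv res i * i := by nlinarith
  omega

-- outer loop of factorize: while i*i <= x: …; i += 1   (same totality guards)
def factLoop (x res i : Int) (fd : PySem.Dict Int Int) : Int × PySem.Dict Int Int :=
  if h : i * i ≤ x ∧ 2 ≤ i ∧ 0 < res then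
    if PySem.Int.mod res i = 0 then
      let p := divOutA i res (fd.insert i 0)
      factLoop x p.1 (i + 1) p.2
    else factLoop x res (i + 1) fd
  else (res, fd)
termination_by (x - i).toNat
decreasing_by
  · rcases h with ⟨hx, hi, -⟩
    have : 2 * i ≤ i * i := by nlinarith
    omega
  · rcases h with ⟨hx, hi, -⟩
    have : 2 * i ≤ i * i := by nlinarith
    omega

-- for k in fdict.keys(): if not is_bin(k): return "NO" ; return "YES"
def scanKeys : List Int → String
  | [] => "YES"
  | k :: ks => if pyIsBin k then scanKeys ks else "NO"

def solve (n : Int) : String :=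
  if pyIsBin n then "YES"
  else
    let m := pyStrip n
    let p := factLoop m m 2 PySem.Dict.empty
    let fd := if 1 < p.1 then p.2.insert p.1 1 else p.2
    scanKeys fd.keys

-- ===== PORT B =====

-- while n % p == 0: n //= p   (totality guards as above; p is one of 11, 101, 10111)
def stripFac (i res : Int) : Int :=
  if h : PySem.Int.mod res i = 0 ∧ 0 < res ∧ 2 ≤ i then
    stripFac i (PySem.Int.floordiv res i)
  else res
termination_by res.natAbs
decreasing_by
  have h1 := PySem.Int.floordiv_mul_add_mod res i
  rcases h with ⟨hm, hr, hi⟩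
  rw [hm] at h1
  have hq : 0 < PySem.Int.floordiv res i := by nlinarith
  have : PySem.Int.floordiv res i * 2 ≤ PySem.Int.floordiv res i * i := by nlinarith
  omega

-- is_prime: i = 2; while i*i <= m: if m % i == 0: return False; i += 1; return True
def isPrimeLoop (m i : Int) : Bool :=
  if h : i * i ≤ m ∧ 2 ≤ i then
    if PySem.Int.mod m i = 0 then false else isPrimeLoop m (i + 1)
  else true
termination_by (m - i).toNat
decreasing_by
  rcases h with ⟨hx, hi⟩
  have : 2 * i ≤ i * i := by nlinarith
  omega

def solve_alt (n : Int) : String :=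
  if pyIsBin n then "YES"
  else
    let m := pyStrip n
    if m < 2 then "YES"
    else
      -- for p in (11, 101, 10111): while n % p == 0: n //= p
      let r := stripFac 10111 (stripFac 101 (stripFac 11 m))
      if r = 1 then "YES"
      else if pyIsBin r && isPrimeLoop r 2 then "YES" else "NO"

-- ===== PRECONDITION & SPEC =====
def Spec_solve (n : Int) (out : String) : Prop := out = solve_alt n
instance (n : Int) (out : String) : Decidable (Spec_solve n out) := by unfold Spec_solve; infer_instance

-- ===== CLAIM (what is proved, stated in full; the proofs are below) =====
def Claim_equal_solve : Prop := ∀ (n : Int), Dom_solve n → Spec_solve n (solve n)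

-- ===== LEMMAS AND PROOFS =====

-- "every (positive) prime factor of m has only digits 0 and 1"
def AllBin (m : Int) : Prop :=
  ∀ p : Int, Prime p → 0 < p → p ∣ m → pyIsBin p = true

theorem int_prime_two_le (p : Int) (hp : Prime p) (h0 : 0 < p) : 2 ≤ p := by
  have h := Int.prime_iff_natAbs_prime.mp hp
  have := h.two_le
  omega

theorem int_prime_eq_of_dvd (p q : Int) (hp : Prime p) (hq : Prime q)
    (hp0 : 0 < p) (hq0 : 0 < q) (h : p ∣ q) : p = q := by
  have h1 := Int.prime_iff_natAbs_prime.mp hp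
  have h2 := Int.prime_iff_natAbs_prime.mp hq
  have h3 := Int.natAbs_dvd_natAbs.mpr h
  have h4 := (Nat.prime_dvd_prime_iff_eq h1 h2).mp h3
  omega

theorem int_exists_prime_factor (r : Int) (hr : 2 ≤ r) :
    ∃ p : Int, Prime p ∧ 0 < p ∧ p ∣ r ∧ (¬ Prime r → p * p ≤ r) := by
  have ht : 2 ≤ r.toNat := by omega
  have hrt : (r.toNat : Int) = r := by omega
  have hmp : (r.toNat).minFac.Prime := Nat.minFac_prime (by omega)
  refine ⟨(r.toNat.minFac : Int), ?_, ?_, ?_, ?_⟩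
  · rw [Int.prime_iff_natAbs_prime, Int.natAbs_natCast]; exact hmp
  · exact_mod_cast hmp.pos
  · rw [← hrt]; exact_mod_cast r.toNat.minFac_dvd
  · intro hnp
    have hnpn : ¬ (r.toNat).Prime := by
      intro h
      apply hnp
      have hpr : Prime ((r.toNat : Int)) := by
        rw [Int.prime_iff_natAbs_prime, Int.natAbs_natCast]; exact h
      rwa [hrt] at hpr
    have := Nat.minFac_sq_le_self (by omega) hnpn
    rw [pow_two] at this
    have : ((r.toNat.minFac * r.toNat.minFac : Nat) : Int) ≤ (r.toNat : Int) := by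
      exact_mod_cast this
    push_cast at this
    omega

theorem prime_iff_no_small (r : Int) (hr : 2 ≤ r) :
    Prime r ↔ (∀ j : Int, 2 ≤ j → j * j ≤ r → ¬ j ∣ r) := by
  constructor
  · intro hp j hj hsq hd
    have h1 := Int.prime_iff_natAbs_prime.mp hp
    have h2 := Int.natAbs_dvd_natAbs.mpr hd
    have h3 := h1.eq_one_or_self_of_dvd _ h2
    rcases h3 with h3 | h3
    · omega
    · have hje : j = r := by omega
      subst hje
      nlinarith
  · intro h
    by_contra hnp
    rcases int_exists_prime_factor r hr with ⟨p, pp, p0, pd, psq⟩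
    exact h p (int_prime_two_le p pp p0) (psq hnp) pd

-- ---- pyStrip facts ----
theorem pyStrip_dvd (x : Int) : pyStrip x ∣ x := by
  fun_induction pyStrip x with
  | case1 x h ih =>
      have h1 := PySem.Int.floordiv_mul_add_mod x 10
      rcases h with ⟨hm, hx⟩
      rw [hm, add_zero] at h1
      exact dvd_trans ih ⟨10, h1.symm⟩
  | case2 x h => exact dvd_refl x

theorem pyStrip_nonpos (x : Int) (hx : x ≤ 0) : pyStrip x ≤ 0 := by
  fun_induction pyStrip x with
  | case1 x h ih =>
      have h1 := PySem.Int.floordiv_mul_add_mod x 10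
      rcases h with ⟨hm, -⟩
      rw [hm, add_zero] at h1
      exact ih (by omega)
  | case2 x h => exact hx

-- ---- stripFac facts ----
theorem stripFac_dvd (i res : Int) : stripFac i res ∣ res := by
  fun_induction stripFac i res with
  | case1 res h ih =>
      have h1 := PySem.Int.floordiv_mul_add_mod res i
      rcases h with ⟨hm, hr, hi⟩
      rw [hm, add_zero] at h1
      exact dvd_trans ih ⟨i, h1.symm⟩
  | case2 res h => exact dvd_refl res

theorem stripFac_not_dvd (i res : Int) (hr : 0 < res) (hi : 2 ≤ i) :
    ¬ (i ∣ stripFac i res) := by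
  fun_induction stripFac i res with
  | case1 res h ih =>
      have h1 := PySem.Int.floordiv_mul_add_mod res i
      rcases h with ⟨hm, hr', hi'⟩
      rw [hm] at h1
      exact ih (by nlinarith)
  | case2 res h =>
      intro hd
      exact h ⟨(PySem.Int.mod_eq_zero_iff_dvd res i).mpr hd, hr, hi⟩

theorem stripFac_pos (i res : Int) (hr : 0 < res) : 0 < stripFac i res := by
  fun_induction stripFac i res with
  | case1 res h ih =>
      have h1 := PySem.Int.floordiv_mul_add_mod res i
      rcases h with ⟨hm, hr', hi⟩
      rw [hm, add_zero] at h1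
      exact ih (by nlinarith)
  | case2 res h => exact hr

theorem stripFac_prime_dvd (i res p : Int) (hip : Prime i) (hi0 : 0 < i)
    (hp : Prime p) (hp0 : 0 < p) (hne : p ≠ i) (hd : p ∣ res) :
    p ∣ stripFac i res := by
  revert hd
  fun_induction stripFac i res with
  | case1 res h ih =>
      intro hd
      have h1 := PySem.Int.floordiv_mul_add_mod res i
      rcases h with ⟨hm, hr', hi⟩
      rw [hm, add_zero] at h1
      apply ih
      have hd' : p ∣ PySem.Int.floordiv res i * i := by rw [h1]; exact hd
      rcases hp.2.2 (PySem.Int.floordiv res i) i hd' with hc | hc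
      · exact hc
      · exact absurd (int_prime_eq_of_dvd p i hp hip hp0 hi0 hc) hne
  | case2 res h => exact id

-- ---- A-side loop lemmas ----
theorem divOutA_fst (i res : Int) (fd : PySem.Dict Int Int) :
    (divOutA i res fd).1 = stripFac i res := by
  fun_induction divOutA i res fd with
  | case1 res fd h ih => rw [stripFac, dif_pos h]; exact ih
  | case2 res fd h => rw [stripFac, dif_neg h]

theorem divOutA_keys (i res : Int) (fd : PySem.Dict Int Int) (hc : fd.contains i = true) :
    (divOutA i res fd).2.keys = fd.keys := by
  fun_induction divOutA i res fd with
  | case1 res fd h ih =>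
      have hc' : (fd.modify i 0 (· + 1)).contains i = true := by
        rw [PySem.Dict.contains_modify]; simp
      rw [ih hc', PySem.Dict.keys_modify, PySem.Dict.keys_insert_of_contains _ _ hc]
  | case2 res fd h => rfl

theorem scanKeys_eq (ks : List Int) :
    scanKeys ks = if ks.all (fun k => pyIsBin k) then "YES" else "NO" := by
  induction ks with
  | nil => simp [scanKeys]
  | cons k ks ih =>
      simp only [scanKeys, List.all_cons, ih]
      by_cases hk : pyIsBin k = true <;> simp [hk]

-- the dict produced by A's main loop (with the final residual insertion) holds exactly the
-- positive prime divisors of x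
theorem factLoop_main (μ : Nat) : ∀ (x res i : Int) (fd : PySem.Dict Int Int),
    (x - i).toNat = μ →
    0 < x → 0 < res → 2 ≤ i → res ∣ x →
    (∀ p : Int, Prime p → 0 < p → p ∣ res → i ≤ p) →
    (∀ p : Int, Prime p → 0 < p → p ∣ x → i ≤ p → p ∣ res) →
    (∀ k : Int, k ∈ fd.keys ↔ (Prime k ∧ 0 < k ∧ k ∣ x ∧ k < i)) →
    ∀ k : Int, k ∈ (if 1 < (factLoop x res i fd).1
        then (factLoop x res i fd).2.insert (factLoop x res i fd).1 1
        else (factLoop x res i fd).2).keys ↔ (Prime k ∧ 0 < k ∧ k ∣ x) := by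
  induction μ using Nat.strong_induction_on with
  | _ μ ih =>
    intro x res i fd hμ hx hres hi hdvd ha hb hkeys k
    rw [factLoop]
    by_cases hg : i * i ≤ x
    · have hlt : 2 * i ≤ i * i := by nlinarith
      rw [dif_pos ⟨hg, hi, hres⟩]
      by_cases hm : PySem.Int.mod res i = 0
      · rw [if_pos hm]
        have hidvd : i ∣ res := (PySem.Int.mod_eq_zero_iff_dvd res i).mp hm
        have hiprime : Prime i := by
          have ht2 : 2 ≤ i.toNat := by omega
          have hqp : (i.toNat).minFac.Prime := Nat.minFac_prime (by omega)
          have hti : (i.toNat : Int) = i := by omega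
          have hqd : ((i.toNat.minFac : Nat) : Int) ∣ i := by
            rw [← hti]; exact_mod_cast i.toNat.minFac_dvd
          have hqi : Prime ((i.toNat.minFac : Nat) : Int) := by
            rw [Int.prime_iff_natAbs_prime, Int.natAbs_natCast]; exact hqp
          have h1 := ha _ hqi (by exact_mod_cast hqp.pos) (dvd_trans hqd hidvd)
          have h2 : ((i.toNat.minFac : Nat) : Int) ≤ i := by
            have := Nat.minFac_le (by omega : 0 < i.toNat); omega
          have he : ((i.toNat.minFac : Nat) : Int) = i := le_antisymm h2 h1
          rwa [he] at hqi
        have hfresh : fd.contains i = false := by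
          by_contra hc
          have hmem : i ∈ fd.keys := (PySem.Dict.contains_iff_mem_keys fd i).mp
            (by revert hc; cases fd.contains i <;> simp)
          have := (hkeys i).mp hmem
          omega
        have hkeys2 : (divOutA i res (fd.insert i 0)).2.keys = fd.keys ++ [i] := by
          rw [divOutA_keys _ _ _ (by rw [PySem.Dict.contains_insert_self]),
              PySem.Dict.keys_insert_of_not_contains _ _ hfresh]
        have hfst : (divOutA i res (fd.insert i 0)).1 = stripFac i res := divOutA_fst _ _ _
        simp only [hfst]
        refine ih (x - (i + 1)).toNat (by omega) x (stripFac i res) (i + 1) _ rfl hx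
          (stripFac_pos _ _ hres) (by omega) (dvd_trans (stripFac_dvd i res) hdvd)
          ?_ ?_ ?_ k
        · intro p pp p0 pd
          have hge := ha p pp p0 (dvd_trans pd (stripFac_dvd i res))
          have hne : p ≠ i := by
            rintro rfl
            exact stripFac_not_dvd p res hres hi pd
          omega
        · intro p pp p0 px hip
          have hpr : p ∣ res := hb p pp p0 px (by omega)
          exact stripFac_prime_dvd i res p hiprime (by omega) pp p0 (by omega) hpr
        · intro k'
          rw [hkeys2]
          constructor
          · intro hk
            rcases List.mem_append.mp hk with hk | hk
            · have := (hkeys k').mp hk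
              exact ⟨this.1, this.2.1, this.2.2.1, by omega⟩
            · simp only [List.mem_singleton] at hk
              subst hk
              exact ⟨hiprime, by omega, dvd_trans hidvd hdvd, by omega⟩
          · rintro ⟨pk, pos, dx, hlt'⟩
            by_cases hki : k' < i
            · exact List.mem_append.mpr (Or.inl ((hkeys k').mpr ⟨pk, pos, dx, hki⟩))
            · have : k' = i := by omega
              simp [this]
      · rw [if_neg hm]
        refine ih (x - (i + 1)).toNat (by omega) x res (i + 1) fd rfl hx hres (by omega)
          hdvd ?_ (fun p pp p0 px hip => hb p pp p0 px (by omega)) ?_ k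
        · intro p pp p0 pd
          have hge := ha p pp p0 pd
          have hne : p ≠ i := by
            rintro rfl
            exact hm ((PySem.Int.mod_eq_zero_iff_dvd res p).mpr pd)
          omega
        · intro k'
          rw [hkeys k']
          constructor
          · rintro ⟨pk, pos, dx, h⟩; exact ⟨pk, pos, dx, by omega⟩
          · rintro ⟨pk, pos, dx, h⟩
            refine ⟨pk, pos, dx, ?_⟩
            rcases lt_or_eq_of_le (by omega : k' ≤ i) with h' | rfl
            · exact h'
            · exact absurd ((PySem.Int.mod_eq_zero_iff_dvd res k').mpr
                (hb k' pk pos dx (le_refl k'))) hm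
    · rw [dif_neg (by tauto)]
      by_cases h1r : 1 < res
      · rw [if_pos h1r]
        have hrx : res ≤ x := Int.le_of_dvd hx hdvd
        have hrprime : Prime res := by
          rcases int_exists_prime_factor res (by omega) with ⟨p, pp, p0, pd, psq⟩
          by_contra hnp
          have hsq := psq hnp
          have hip := ha p pp p0 pd
          nlinarith
        have hfreshr : fd.contains res = false := by
          by_contra hc
          have hmem : res ∈ fd.keys := (PySem.Dict.contains_iff_mem_keys fd res).mp
            (by revert hc; cases fd.contains res <;> simp)
          have h1 := (hkeys res).mp hmem
          have h2 := ha res hrprime (by omega) (dvd_refl res)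
          omega
        rw [PySem.Dict.keys_insert_of_not_contains _ _ hfreshr]
        constructor
        · intro hk
          rcases List.mem_append.mp hk with hk | hk
          · have := (hkeys k).mp hk
            exact ⟨this.1, this.2.1, this.2.2.1⟩
          · simp only [List.mem_singleton] at hk
            subst hk
            exact ⟨hrprime, by omega, hdvd⟩
        · rintro ⟨pk, pos, dx⟩
          by_cases hki : k < i
          · exact List.mem_append.mpr (Or.inl ((hkeys k).mpr ⟨pk, pos, dx, hki⟩))
          · have hkr : k ∣ res := hb k pk pos dx (by omega)
            have : k = res := int_prime_eq_of_dvd k res pk hrprime pos (by omega) hkr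
            simp [this]
      · rw [if_neg h1r]
        constructor
        · intro hk
          have := (hkeys k).mp hk
          exact ⟨this.1, this.2.1, this.2.2.1⟩
        · rintro ⟨pk, pos, dx⟩
          by_cases hki : k < i
          · exact (hkeys k).mpr ⟨pk, pos, dx, hki⟩
          · have hkr : k ∣ res := hb k pk pos dx (by omega)
            have hres1 : res = 1 := by omega
            rw [hres1] at hkr
            have h1 := Int.le_of_dvd (by omega) hkr
            have h2 := int_prime_two_le k pk pos
            omega

-- ---- B-side primality loop ----
theorem isPrimeLoop_iff (μ : Nat) : ∀ (r i : Int),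
    (r - i).toNat = μ → 2 ≤ i →
    (∀ j : Int, 2 ≤ j → j < i → ¬ j ∣ r) →
    (isPrimeLoop r i = true ↔ ∀ j : Int, 2 ≤ j → j * j ≤ r → ¬ j ∣ r) := by
  induction μ using Nat.strong_induction_on with
  | _ μ ih =>
    intro r i hμ hi hno
    rw [isPrimeLoop]
    by_cases hg : i * i ≤ r
    · rw [dif_pos ⟨hg, hi⟩]
      have hlt : 2 * i ≤ i * i := by nlinarith
      by_cases hm : PySem.Int.mod r i = 0
      · rw [if_pos hm]
        simp only [Bool.false_eq_true, false_iff]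
        push Not
        exact ⟨i, hi, hg, (PySem.Int.mod_eq_zero_iff_dvd r i).mp hm⟩
      · rw [if_neg hm]
        refine ih (r - (i + 1)).toNat (by omega) r (i + 1) rfl (by omega) ?_
        intro j hj hji hdj
        rcases lt_or_eq_of_le (by omega : j ≤ i) with hlt' | rfl
        · exact hno j hj hlt' hdj
        · exact hm ((PySem.Int.mod_eq_zero_iff_dvd r j).mpr hdj)
    · rw [dif_neg (by tauto)]
      simp only [true_iff]
      intro j hj hsq hdj
      have hji : j < i := by nlinarith
      exact hno j hj hji hdj

-- ---- binary-digit enumeration: the only bin primes below 46341 are 11, 101, 10111 ----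
theorem bin_step (p : Int) (hb : pyIsBin p = true) (hne : p ≠ 0) :
    ∃ q d : Int, p = 10 * q + d ∧ 0 ≤ d ∧ d ≤ 1 ∧
      q = PySem.Int.floordiv p 10 ∧ pyIsBin q = true := by
  rw [pyIsBin, dif_neg hne] at hb
  by_cases hm : 1 < PySem.Int.mod p 10
  · rw [if_pos hm] at hb
    simp at hb
  · rw [if_neg hm] at hb
    have h1 := PySem.Int.floordiv_mul_add_mod p 10
    have h2 := PySem.Int.mod_nonneg p (b := 10) (by norm_num)
    exact ⟨PySem.Int.floordiv p 10, PySem.Int.mod p 10, by omega, h2, by omega, rfl, hb⟩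

theorem bin_lt1 (p : Int) (h0 : 0 ≤ p) (hlt : p < 10) (hb : pyIsBin p = true) :
    p = 0 ∨ p = 1 := by
  rcases eq_or_ne p 0 with rfl | hne
  · omega
  obtain ⟨q, d, hpe, hd0, hd1, hq, hbq⟩ := bin_step p hb hne
  omega

theorem bin_lt2 (p : Int) (h0 : 0 ≤ p) (hlt : p < 100) (hb : pyIsBin p = true) :
    p = 0 ∨ p = 1 ∨ p = 10 ∨ p = 11 := by
  rcases eq_or_ne p 0 with rfl | hne
  · omega
  obtain ⟨q, d, hpe, hd0, hd1, hq, hbq⟩ := bin_step p hb hne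
  have := bin_lt1 q (by omega) (by omega) hbq
  omega

theorem bin_lt3 (p : Int) (h0 : 0 ≤ p) (hlt : p < 1000) (hb : pyIsBin p = true) :
    p = 0 ∨ p = 1 ∨ p = 10 ∨ p = 11 ∨ p = 100 ∨ p = 101 ∨ p = 110 ∨ p = 111 := by
  rcases eq_or_ne p 0 with rfl | hne
  · omega
  obtain ⟨q, d, hpe, hd0, hd1, hq, hbq⟩ := bin_step p hb hne
  have := bin_lt2 q (by omega) (by omega) hbq
  omega

theorem bin_lt4 (p : Int) (h0 : 0 ≤ p) (hlt : p < 10000) (hb : pyIsBin p = true) :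
    p = 0 ∨ p = 1 ∨ p = 10 ∨ p = 11 ∨ p = 100 ∨ p = 101 ∨ p = 110 ∨ p = 111 ∨
    p = 1000 ∨ p = 1001 ∨ p = 1010 ∨ p = 1011 ∨ p = 1100 ∨ p = 1101 ∨ p = 1110 ∨
    p = 1111 := by
  rcases eq_or_ne p 0 with rfl | hne
  · omega
  obtain ⟨q, d, hpe, hd0, hd1, hq, hbq⟩ := bin_step p hb hne
  have := bin_lt3 q (by omega) (by omega) hbq
  omega

theorem bin_lt5 (p : Int) (h0 : 0 ≤ p) (hlt : p < 100000) (hb : pyIsBin p = true) :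
    p = 0 ∨ p = 1 ∨ p = 10 ∨ p = 11 ∨ p = 100 ∨ p = 101 ∨ p = 110 ∨ p = 111 ∨
    p = 1000 ∨ p = 1001 ∨ p = 1010 ∨ p = 1011 ∨ p = 1100 ∨ p = 1101 ∨ p = 1110 ∨ p = 1111 ∨
    p = 10000 ∨ p = 10001 ∨ p = 10010 ∨ p = 10011 ∨ p = 10100 ∨ p = 10101 ∨ p = 10110 ∨
    p = 10111 ∨ p = 11000 ∨ p = 11001 ∨ p = 11010 ∨ p = 11011 ∨ p = 11100 ∨ p = 11101 ∨
    p = 11110 ∨ p = 11111 := by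
  rcases eq_or_ne p 0 with rfl | hne
  · omega
  obtain ⟨q, d, hpe, hd0, hd1, hq, hbq⟩ := bin_step p hb hne
  have := bin_lt4 q (by omega) (by omega) hbq
  omega

theorem keyFact (p : Int) (hp : Prime p) (h0 : 0 < p) (hb : pyIsBin p = true)
    (hlt : p < 46341) : p = 11 ∨ p = 101 ∨ p = 10111 := by
  have h32 := bin_lt5 p (by omega) (by omega) hb
  have hnp := Int.prime_iff_natAbs_prime.mp hp
  have h2 := int_prime_two_le p hp h0
  rcases h32 with rfl | rfl | rfl | rfl | rfl | rfl | rfl | rfl | rfl | rfl | rfl | rfl |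
    rfl | rfl | rfl | rfl | rfl | rfl | rfl | rfl | rfl | rfl | rfl | rfl | rfl | rfl |
    rfl | rfl | rfl | rfl | rfl | rfl <;>
    first
      | omega
      | (exfalso; revert hnp; norm_num)

theorem pyIsBin_step_eq (x : Int) (hne : x ≠ 0) (hm : ¬ 1 < PySem.Int.mod x 10) :
    pyIsBin x = pyIsBin (PySem.Int.floordiv x 10) := by
  rw [pyIsBin, dif_neg hne, if_neg hm]

theorem pyIsBin_zero : pyIsBin 0 = true := by
  rw [pyIsBin]
  simp

theorem pyIsBin_11 : pyIsBin 11 = true := by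
  rw [pyIsBin_step_eq 11 (by norm_num) (by decide),
    show PySem.Int.floordiv (11 : Int) 10 = 1 by decide,
    pyIsBin_step_eq 1 (by norm_num) (by decide),
    show PySem.Int.floordiv (1 : Int) 10 = 0 by decide]
  exact pyIsBin_zero

theorem pyIsBin_101 : pyIsBin 101 = true := by
  rw [pyIsBin_step_eq 101 (by norm_num) (by decide),
    show PySem.Int.floordiv (101 : Int) 10 = 10 by decide,
    pyIsBin_step_eq 10 (by norm_num) (by decide),
    show PySem.Int.floordiv (10 : Int) 10 = 1 by decide,
    pyIsBin_step_eq 1 (by norm_num) (by decide),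
    show PySem.Int.floordiv (1 : Int) 10 = 0 by decide]
  exact pyIsBin_zero

theorem pyIsBin_10111 : pyIsBin 10111 = true := by
  rw [pyIsBin_step_eq 10111 (by norm_num) (by decide),
    show PySem.Int.floordiv (10111 : Int) 10 = 1011 by decide,
    pyIsBin_step_eq 1011 (by norm_num) (by decide),
    show PySem.Int.floordiv (1011 : Int) 10 = 101 by decide]
  exact pyIsBin_101

-- ===== VERDICT (by name: the statement is the Claim_ definition above) =====
theorem solve_spec : Claim_equal_solve := by
  unfold Claim_equal_solve Spec_solve
  intro n hdom
  have hn31 : n ≤ 2147483648 := by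
    unfold Dom_solve pvDomInt at hdom
    simp only [decide_eq_true_eq] at hdom
    omega
  unfold solve solve_alt
  by_cases hbn : pyIsBin n = true
  · simp [hbn]
  · simp only [hbn, Bool.false_eq_true, if_false]
    set m := pyStrip n with hmdef
    by_cases hm2 : m < 2
    · rw [if_pos hm2]
      have hf : factLoop m m 2 PySem.Dict.empty = (m, PySem.Dict.empty) := by
        rw [factLoop, dif_neg (by omega)]
      rw [hf]
      show scanKeys (if 1 < m then (PySem.Dict.empty.insert m 1)
        else (PySem.Dict.empty : PySem.Dict Int Int)).keys = "YES"
      rw [if_neg (by omega)]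
      rfl
    · rw [if_neg hm2]
      have hmge : 2 ≤ m := by omega
      have hnpos : 0 < n := by
        by_contra h
        have := pyStrip_nonpos n (by omega)
        omega
      have hmn : m ∣ n := pyStrip_dvd n
      have hmle : m ≤ n := Int.le_of_dvd hnpos hmn
      have h31 : m ≤ 2147483648 := le_trans hmle hn31
      have hp11 : Prime (11 : Int) := by rw [Int.prime_iff_natAbs_prime]; norm_num
      have hp101 : Prime (101 : Int) := by rw [Int.prime_iff_natAbs_prime]; norm_num
      have hp10111 : Prime (10111 : Int) := by rw [Int.prime_iff_natAbs_prime]; norm_num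
      set r := stripFac 10111 (stripFac 101 (stripFac 11 m)) with hrdef
      have hs1pos : 0 < stripFac 11 m := stripFac_pos _ _ (by omega)
      have hs2pos : 0 < stripFac 101 (stripFac 11 m) := stripFac_pos _ _ hs1pos
      have hrpos : 0 < r := stripFac_pos _ _ hs2pos
      have hrdvd : r ∣ m :=
        dvd_trans (stripFac_dvd _ _) (dvd_trans (stripFac_dvd _ _) (stripFac_dvd _ _))
      have hrlem : r ≤ m := Int.le_of_dvd (by omega) hrdvd
      have hnd11 : ¬ (11 : Int) ∣ r := fun h =>
        stripFac_not_dvd 11 m (by omega) (by norm_num)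
          (dvd_trans h (dvd_trans (stripFac_dvd _ _) (stripFac_dvd _ _)))
      have hnd101 : ¬ (101 : Int) ∣ r := fun h =>
        stripFac_not_dvd 101 (stripFac 11 m) hs1pos (by norm_num)
          (dvd_trans h (stripFac_dvd _ _))
      have hnd10111 : ¬ (10111 : Int) ∣ r :=
        stripFac_not_dvd _ _ hs2pos (by norm_num)
      have hpres : ∀ p : Int, Prime p → 0 < p → p ∣ m →
          p ≠ 11 → p ≠ 101 → p ≠ 10111 → p ∣ r := by
        intro p pp p0 pdm h1 h2 h3
        exact stripFac_prime_dvd 10111 _ p hp10111 (by norm_num) pp p0 h3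
          (stripFac_prime_dvd 101 _ p hp101 (by norm_num) pp p0 h2
            (stripFac_prime_dvd 11 _ p hp11 (by norm_num) pp p0 h1 pdm))
      have hA := factLoop_main (m - 2).toNat m m 2 PySem.Dict.empty rfl (by omega)
        (by omega) (le_refl 2) (dvd_refl m)
        (fun p pp p0 _ => int_prime_two_le p pp p0)
        (fun p pp p0 pd _ => pd)
        (by
          intro k
          constructor
          · intro hk
            exact absurd hk (by simp [PySem.Dict.empty])
          · rintro ⟨pk, pos, -, hlt⟩
            have := int_prime_two_le k pk pos
            omega)
      by_cases hall : AllBin m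
      · have hAyes : scanKeys (if 1 < (factLoop m m 2 PySem.Dict.empty).1
            then (factLoop m m 2 PySem.Dict.empty).2.insert
              (factLoop m m 2 PySem.Dict.empty).1 1
            else (factLoop m m 2 PySem.Dict.empty).2).keys = "YES" := by
          rw [scanKeys_eq, if_pos]
          rw [List.all_eq_true]
          intro k hk
          have hkk := (hA k).mp hk
          exact hall k hkk.1 hkk.2.1 hkk.2.2
        rw [hAyes]
        by_cases hr1 : r = 1
        · rw [if_pos hr1]
        · have hr2 : 2 ≤ r := by omega
          rcases int_exists_prime_factor r hr2 with ⟨p, pp, p0, pd, psq⟩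
          have pbin : pyIsBin p = true := hall p pp p0 (dvd_trans pd hrdvd)
          have hpge : 46341 ≤ p := by
            by_contra h
            rcases keyFact p pp p0 pbin (by omega) with rfl | rfl | rfl
            · exact hnd11 pd
            · exact hnd101 pd
            · exact hnd10111 pd
          have hrprime : Prime r := by
            by_contra hnp
            have hsq := psq hnp
            nlinarith
          have hrbin : pyIsBin r = true := hall r hrprime (by omega) hrdvd
          have hloop : isPrimeLoop r 2 = true := by
            rw [isPrimeLoop_iff (r - 2).toNat r 2 rfl (le_refl 2)
              (by intro j hj hji; omega)]
            exact (prime_iff_no_small r hr2).mp hrprime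
          rw [if_neg hr1]
          simp [hrbin, hloop]
      · have hex : ∃ p : Int, Prime p ∧ 0 < p ∧ p ∣ m ∧ pyIsBin p = false := by
          unfold AllBin at hall
          push Not at hall
          rcases hall with ⟨p, pp, p0, pdm, pnb⟩
          exact ⟨p, pp, p0, pdm, by revert pnb; cases pyIsBin p <;> simp⟩
        rcases hex with ⟨p, pp, p0, pdm, pnb⟩
        have hAno : scanKeys (if 1 < (factLoop m m 2 PySem.Dict.empty).1
            then (factLoop m m 2 PySem.Dict.empty).2.insert
              (factLoop m m 2 PySem.Dict.empty).1 1
            else (factLoop m m 2 PySem.Dict.empty).2).keys = "NO" := by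
          rw [scanKeys_eq, if_neg]
          rw [List.all_eq_true]
          push Not
          exact ⟨p, (hA p).mpr ⟨pp, p0, pdm⟩, by simp [pnb]⟩
        rw [hAno]
        have hne11 : p ≠ 11 := by rintro rfl; simp [pyIsBin_11] at pnb
        have hne101 : p ≠ 101 := by rintro rfl; simp [pyIsBin_101] at pnb
        have hne10111 : p ≠ 10111 := by rintro rfl; simp [pyIsBin_10111] at pnb
        have hpr : p ∣ r := hpres p pp p0 pdm hne11 hne101 hne10111
        have hple : p ≤ r := Int.le_of_dvd hrpos hpr
        have hp2 := int_prime_two_le p pp p0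
        have hrne1 : r ≠ 1 := by omega
        have hr2 : 2 ≤ r := by omega
        rw [if_neg hrne1]
        have hBno : (pyIsBin r && isPrimeLoop r 2) = false := by
          by_cases hrp : Prime r
          · have hpe : p = r := int_prime_eq_of_dvd p r pp hrp p0 (by omega) hpr
            rw [← hpe, pnb]
            simp
          · have hl : isPrimeLoop r 2 = false := by
              cases hl : isPrimeLoop r 2
              · rfl
              · exfalso
                apply hrp
                rw [prime_iff_no_small r hr2]
                exact (isPrimeLoop_iff (r - 2).toNat r 2 rfl (le_refl 2)
                  (by intro j hj hji; omega)).mp hl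
            simp [hl]
        simp [hBno]
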